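-- pv_equiv track=rewrite | github.com/EPIUSECX/cohenix_local_za | za_local/setup/custom_fields.py | validate_south_african_id
-- ===== SOURCE A (Python) =====
-- def validate_south_african_id(id_number):
--     """
--     Validate South African ID number format and checksum.
--
--     Format: YYMMDD SSSS CAZ
--     - YYMMDD: Date of birth
--     - SSSS: Gender (Females: 0000-4999, Males: 5000-9999)
--     - C: Citizenship (0: SA, 1: Permanent resident)
--     - A: Usually 8 or 9 (historical)
--     - Z: Checksum digit (Luhn algorithm)
--
--     Args:
--         id_number (str): South African ID number to validate
--
--     Returns:
--         bool: True if valid, False otherwise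
--     """
--     if not id_number or not id_number.isdigit() or len(id_number) != 13:
--         return False
--
--     # Birth date validation
--     year = int(id_number[:2])
--     month = int(id_number[2:4])
--     day = int(id_number[4:6])
--
--     if month < 1 or month > 12 or day < 1 or day > 31:
--         return False
--
--     # Calculate checksum using Luhn algorithm
--     checksum = 0
--     for i, digit in enumerate(id_number[:-1]):
--         num = int(digit)
--         if i % 2 == 0:
--             checksum += num
--         else:
--             checksum += (num * 2 if num * 2 <= 9 else num * 2 - 9)
--
--     check_digit = (10 - (checksum % 10)) % 10
--     return check_digit == int(id_number[-1])
-- ===== SOURCE B (Python) =====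
-- def validate_south_african_id(id_number):
--     if not id_number or not id_number.isdigit() or len(id_number) != 13:
--         return False
--     month = int(id_number[2:4])
--     day = int(id_number[4:6])
--     if month < 1 or month > 12 or day < 1 or day > 31:
--         return False
--     # Official SA-ID checksum: even-position digits summed directly; odd-position
--     # digits concatenated into one number, doubled, and its decimal digits summed.
--     even_sum = 0
--     for i in range(0, 12, 2):
--         even_sum += int(id_number[i])
--     odd_concat = 0
--     for i in range(1, 12, 2):
--         odd_concat = odd_concat * 10 + int(id_number[i])
--     t = 2 * odd_concat
--     odd_sum = 0
--     while t > 0: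
--         odd_sum += t % 10
--         t //= 10
--     total = even_sum + odd_sum
--     return (10 - total % 10) % 10 == int(id_number[12])
-- ===== Notes on version B (the rewrite author's own statement) =====
-- stated objective: alternative
-- what changed: B replaces A's per-digit Luhn doubling with its <=9 adjustment by the official SA-ID decomposition: sum the even-position digits directly, concatenate the six odd-position digits into one integer, double it once, and sum the decimal digits of that product (a while-loop digit sum), which is equivalent because a carry in the doubled concatenation occurs exactly when a digit is >=5, matching the per-digit -9 adjustment.
import Mathlib
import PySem

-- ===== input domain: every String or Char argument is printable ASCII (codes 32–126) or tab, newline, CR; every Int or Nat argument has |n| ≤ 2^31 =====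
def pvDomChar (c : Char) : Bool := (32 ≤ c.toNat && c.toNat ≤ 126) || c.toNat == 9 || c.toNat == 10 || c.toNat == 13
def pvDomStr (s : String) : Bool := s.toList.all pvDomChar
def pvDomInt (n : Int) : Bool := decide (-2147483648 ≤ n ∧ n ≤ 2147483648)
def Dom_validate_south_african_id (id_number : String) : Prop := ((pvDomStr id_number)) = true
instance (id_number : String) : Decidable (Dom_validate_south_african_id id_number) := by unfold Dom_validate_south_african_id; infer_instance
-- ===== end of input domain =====

-- B replaces A's per-digit Luhn adjustment by the official SA-ID recipe: concatenate the
-- odd-position digits, double that number once, and sum the decimal digits of the product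
-- (objective: alternative decomposition, same cost).

-- ===== PORT A =====
def validate_south_african_id (id_number : String) : Bool :=
  let cs := id_number.toList
  if cs.isEmpty || !PySem.Chars.strIsdigit cs || cs.length != 13 then false
  else
    match PySem.Int.ofChars? (PySem.List.slice cs none (some 2)),
          PySem.Int.ofChars? (PySem.List.slice cs (some 2) (some 4)),
          PySem.Int.ofChars? (PySem.List.slice cs (some 4) (some 6)) with
    | some _year, some month, some day =>
      if month < 1 || month > 12 || day < 1 || day > 31 then false
      else
        let checksum := (PySem.List.enumerate (PySem.List.slice cs none (some (-1)))).foldl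
          (fun acc p =>
            let num := (PySem.Int.ofChars? [p.2]).getD 0   -- int(digit); guard ensures some
            if PySem.Int.mod p.1 2 == 0 then acc + num
            else acc + (if num * 2 ≤ 9 then num * 2 else num * 2 - 9)) 0
        let check_digit := PySem.Int.mod (10 - PySem.Int.mod checksum 10) 10
        decide (check_digit = (PySem.Int.ofChars? [PySem.List.pyGetD cs (-1) ' ']).getD 0)
    | _, _, _ => false   -- unreachable: the all-digit guard makes every int() succeed

-- ===== PORT B =====
-- B-side helper: the trailing `while t > 0` digit-sum loop of Source B
def pvDigitSum (t : Int) : Int :=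
  if _h : 0 < t then PySem.Int.mod t 10 + pvDigitSum (PySem.Int.floordiv t 10) else 0
termination_by t.toNat
decreasing_by
  simp only [PySem.Int.floordiv]
  rw [Int.fdiv_eq_ediv_of_nonneg _ (by norm_num)]
  omega

def validate_south_african_id_alt (id_number : String) : Bool :=
  let cs := id_number.toList
  if cs.isEmpty || !PySem.Chars.strIsdigit cs || cs.length != 13 then false
  else
    match PySem.Int.ofChars? (PySem.List.slice cs (some 2) (some 4)) with
    | none => false   -- unreachable: the all-digit guard makes every int() succeed
    | some month =>
      match PySem.Int.ofChars? (PySem.List.slice cs (some 4) (some 6)) with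
      | none => false   -- unreachable likewise
      | some day =>
      if month < 1 || month > 12 || day < 1 || day > 31 then false
      else
        let even_sum := (PySem.List.pyRange 0 12 2).foldl
          (fun acc i => acc + (PySem.Int.ofChars? [PySem.List.pyGetD cs i ' ']).getD 0) 0
        let odd_concat := (PySem.List.pyRange 1 12 2).foldl
          (fun acc i => acc * 10 + (PySem.Int.ofChars? [PySem.List.pyGetD cs i ' ']).getD 0) 0
        let odd_sum := pvDigitSum (2 * odd_concat)
        let total := even_sum + odd_sum
        decide (PySem.Int.mod (10 - PySem.Int.mod total 10) 10
              = (PySem.Int.ofChars? [PySem.List.pyGetD cs 12 ' ']).getD 0)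

-- ===== PRECONDITION & SPEC =====
def Spec_validate_south_african_id (id_number : String) (out : Bool) : Prop := out = validate_south_african_id_alt id_number
instance (id_number : String) (out : Bool) : Decidable (Spec_validate_south_african_id id_number out) := by unfold Spec_validate_south_african_id; infer_instance

-- ===== CLAIM (what is proved, stated in full; the proofs are below) =====
def Claim_equal_validate_south_african_id : Prop := ∀ (id_number : String), Dom_validate_south_african_id id_number → Spec_validate_south_african_id id_number (validate_south_african_id id_number)

-- ===== LEMMAS AND PROOFS =====

def pvNatDigitSum (n : Nat) : Nat :=
  if n = 0 then 0 else n % 10 + pvNatDigitSum (n / 10)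
termination_by n
decreasing_by exact Nat.div_lt_self (by omega) (by omega)

def pvAdj (d : Nat) : Nat := if 2 * d ≤ 9 then 2 * d else 2 * d - 9

def pvConcat (ds : List Nat) : Nat := ds.foldl (fun a d => 10 * a + d) 0

lemma pvDigitSum_natCast (n : Nat) : pvDigitSum (n : Int) = (pvNatDigitSum n : Int) := by
  induction n using Nat.strong_induction_on with
  | _ n ih =>
    rw [pvDigitSum, pvNatDigitSum]
    by_cases h : n = 0
    · simp [h]
    · have h0 : 0 < (n : Int) := by omega
      rw [dif_pos h0, if_neg h]
      have hm : PySem.Int.mod (n : Int) 10 = ((n % 10 : Nat) : Int) := by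
        simp only [PySem.Int.mod]
        rw [Int.fmod_eq_emod]
        push_cast; simp
      have hd : PySem.Int.floordiv (n : Int) 10 = ((n / 10 : Nat) : Int) := by
        simp only [PySem.Int.floordiv]
        rw [Int.fdiv_eq_ediv_of_nonneg _ (by norm_num)]
        push_cast; rfl
      rw [hm, hd, ih (n / 10) (Nat.div_lt_self (by omega) (by omega))]
      push_cast; ring

lemma pvNatDigitSum_ten_mul_add (m r : Nat) (h : r < 10) :
    pvNatDigitSum (10 * m + r) = pvNatDigitSum m + r := by
  by_cases h0 : 10 * m + r = 0
  · have hm : m = 0 := by omega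
    have hr : r = 0 := by omega
    simp [hm, hr, pvNatDigitSum]
  · rw [pvNatDigitSum, if_neg h0]
    have h1 : (10 * m + r) % 10 = r := by omega
    have h2 : (10 * m + r) / 10 = m := by omega
    rw [h1, h2]; ring

lemma pvNatDigitSum_even_succ (m : Nat) : pvNatDigitSum (2 * m + 1) = pvNatDigitSum (2 * m) + 1 := by
  by_cases h0 : m = 0
  · subst h0; simp [pvNatDigitSum]
  · rw [pvNatDigitSum, if_neg (by omega)]
    conv_rhs => rw [pvNatDigitSum]
    rw [if_neg (by omega)]
    have h1 : (2 * m + 1) % 10 = 2 * m % 10 + 1 := by omega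
    have h2 : (2 * m + 1) / 10 = 2 * m / 10 := by omega
    rw [h1, h2]; ring

lemma pvLuhn (ds : List Nat) (h : ∀ d ∈ ds, d < 10) :
    pvNatDigitSum (2 * pvConcat ds) = (ds.map pvAdj).sum := by
  induction ds using List.reverseRecOn with
  | nil => simp [pvConcat, pvNatDigitSum]
  | append_singleton ds d ih =>
    have hd : d < 10 := h d (by simp)
    have hds : ∀ x ∈ ds, x < 10 := fun x hx => h x (by simp [hx])
    have hc : pvConcat (ds ++ [d]) = 10 * pvConcat ds + d := by
      simp [pvConcat, List.foldl_append]
    rw [hc]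
    by_cases h2d : 2 * d ≤ 9
    · have : 2 * (10 * pvConcat ds + d) = 10 * (2 * pvConcat ds) + 2 * d := by ring
      rw [this, pvNatDigitSum_ten_mul_add _ _ (by omega), ih hds]
      simp [pvAdj, h2d]
    · have : 2 * (10 * pvConcat ds + d) = 10 * (2 * pvConcat ds + 1) + (2 * d - 10) := by omega
      rw [this, pvNatDigitSum_ten_mul_add _ _ (by omega), pvNatDigitSum_even_succ, ih hds]
      simp only [List.map_append, List.map_cons, List.map_nil, List.sum_append,
        List.sum_cons, List.sum_nil, pvAdj, if_neg h2d]
      omega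

lemma pvDigitChar (c : Char) (h : PySem.Chars.isdigit c = true) :
    ∃ d, d < 10 ∧ c = Char.ofNat (48 + d) := by
  simp only [PySem.Chars.isdigit, Bool.and_eq_true, decide_eq_true_eq, Char.le_def] at h
  have h48 : 48 ≤ c.toNat := h.1
  have h57 : c.toNat ≤ 57 := h.2
  refine ⟨c.toNat - 48, by omega, ?_⟩
  have : 48 + (c.toNat - 48) = c.toNat := by omega
  rw [this, Char.ofNat_toNat]

lemma pvOfCharsOne (d : Nat) (h : d < 10) :
    PySem.Int.ofChars? [Char.ofNat (48 + d)] = some (d : Int) := by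
  interval_cases d <;> rfl

lemma pvOfCharsTwo (a b : Nat) (ha : a < 10) (hb : b < 10) :
    PySem.Int.ofChars? [Char.ofNat (48 + a), Char.ofNat (48 + b)] = some (10 * (a : Int) + b) := by
  interval_cases a <;> interval_cases b <;> rfl

lemma pvAdjCast (d : Nat) :
    (if (d : Int) * 2 ≤ 9 then (d : Int) * 2 else (d : Int) * 2 - 9) = ((pvAdj d : Nat) : Int) := by
  unfold pvAdj
  split_ifs with h1 h2 h2 <;> omega

lemma pvLuhn6 (a b c d e f : Nat) (ha : a < 10) (hb : b < 10) (hc : c < 10) (hd : d < 10)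
    (he : e < 10) (hf : f < 10) :
    pvDigitSum (2 * ((((((0 * 10 + (a : Int)) * 10 + b) * 10 + c) * 10 + d) * 10 + e) * 10 + f)) =
      ((pvAdj a : Nat) : Int) + pvAdj b + pvAdj c + pvAdj d + pvAdj e + pvAdj f := by
  have h1 : (((((0 * 10 + (a : Int)) * 10 + b) * 10 + c) * 10 + d) * 10 + e) * 10 + f
      = ((pvConcat [a, b, c, d, e, f] : Nat) : Int) := by
    simp only [pvConcat, List.foldl_cons, List.foldl_nil]
    push_cast; ring
  have h2 : (2 : Int) * ((pvConcat [a, b, c, d, e, f] : Nat) : Int)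
      = ((2 * pvConcat [a, b, c, d, e, f] : Nat) : Int) := by push_cast; ring
  rw [h1, h2, pvDigitSum_natCast, pvLuhn _ ?_]
  · simp only [List.map_cons, List.map_nil, List.sum_cons, List.sum_nil]
    push_cast; ring
  · intro x hx
    simp only [List.mem_cons, List.not_mem_nil, or_false] at hx
    rcases hx with rfl | rfl | rfl | rfl | rfl | rfl <;> assumption

lemma pvList13 {α : Type} (l : List α) (h : l.length = 13) :
    ∃ a0 a1 a2 a3 a4 a5 a6 a7 a8 a9 a10 a11 a12,
      l = [a0, a1, a2, a3, a4, a5, a6, a7, a8, a9, a10, a11, a12] := by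
  rcases l with _|⟨a0,l⟩; · simp at h
  rcases l with _|⟨a1,l⟩; · simp at h
  rcases l with _|⟨a2,l⟩; · simp at h
  rcases l with _|⟨a3,l⟩; · simp at h
  rcases l with _|⟨a4,l⟩; · simp at h
  rcases l with _|⟨a5,l⟩; · simp at h
  rcases l with _|⟨a6,l⟩; · simp at h
  rcases l with _|⟨a7,l⟩; · simp at h
  rcases l with _|⟨a8,l⟩; · simp at h
  rcases l with _|⟨a9,l⟩; · simp at h
  rcases l with _|⟨a10,l⟩; · simp at h
  rcases l with _|⟨a11,l⟩; · simp at h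
  rcases l with _|⟨a12,l⟩; · simp at h
  rcases l with _|⟨x,l⟩
  · exact ⟨a0,a1,a2,a3,a4,a5,a6,a7,a8,a9,a10,a11,a12, rfl⟩
  · simp at h

-- ===== VERDICT (by name: the statement is the Claim_ definition above) =====
theorem validate_south_african_id_spec : Claim_equal_validate_south_african_id := by
  intro s _
  unfold Spec_validate_south_african_id
  cases hg : (s.toList.isEmpty || !PySem.Chars.strIsdigit s.toList || s.toList.length != 13) with
  | true =>
    simp only [validate_south_african_id, validate_south_african_id_alt, hg, if_true]
  | false =>
    have hg' := hg
    simp only [Bool.or_eq_false_iff, Bool.not_eq_false', bne_eq_false_iff_eq] at hg'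
    obtain ⟨⟨hne, hdig⟩, hlen13⟩ := hg'
    obtain ⟨c0,c1,c2,c3,c4,c5,c6,c7,c8,c9,c10,c11,c12, hs⟩ := pvList13 s.toList hlen13
    rw [hs] at hdig
    simp only [PySem.Chars.strIsdigit, List.all_cons, List.all_nil, Bool.and_eq_true] at hdig
    obtain ⟨-, h0, h1, h2, h3, h4, h5, h6, h7, h8, h9, h10, h11, h12, -⟩ := hdig
    obtain ⟨d0, hd0, rfl⟩ := pvDigitChar _ h0
    obtain ⟨d1, hd1, rfl⟩ := pvDigitChar _ h1
    obtain ⟨d2, hd2, rfl⟩ := pvDigitChar _ h2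
    obtain ⟨d3, hd3, rfl⟩ := pvDigitChar _ h3
    obtain ⟨d4, hd4, rfl⟩ := pvDigitChar _ h4
    obtain ⟨d5, hd5, rfl⟩ := pvDigitChar _ h5
    obtain ⟨d6, hd6, rfl⟩ := pvDigitChar _ h6
    obtain ⟨d7, hd7, rfl⟩ := pvDigitChar _ h7
    obtain ⟨d8, hd8, rfl⟩ := pvDigitChar _ h8
    obtain ⟨d9, hd9, rfl⟩ := pvDigitChar _ h9
    obtain ⟨d10, hd10, rfl⟩ := pvDigitChar _ h10
    obtain ⟨d11, hd11, rfl⟩ := pvDigitChar _ h11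
    obtain ⟨d12, hd12, rfl⟩ := pvDigitChar _ h12
    rw [hs] at hg
    simp only [validate_south_african_id, validate_south_african_id_alt, hs, hg,
      Bool.false_eq_true, if_false]
    have hR0 : PySem.List.pyRange 0 12 2 = [0, 2, 4, 6, 8, 10] := by decide
    have hR1 : PySem.List.pyRange 1 12 2 = [1, 3, 5, 7, 9, 11] := by decide
    have hs0 : PySem.List.slice [Char.ofNat (48 + d0), Char.ofNat (48 + d1), Char.ofNat (48 + d2), Char.ofNat (48 + d3), Char.ofNat (48 + d4), Char.ofNat (48 + d5), Char.ofNat (48 + d6), Char.ofNat (48 + d7), Char.ofNat (48 + d8), Char.ofNat (48 + d9), Char.ofNat (48 + d10), Char.ofNat (48 + d11), Char.ofNat (48 + d12)] none (some 2) = [Char.ofNat (48 + d0), Char.ofNat (48 + d1)] := by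
      rw [PySem.List.slice_to _ (by norm_num)]
      rfl
    have hs2 : PySem.List.slice [Char.ofNat (48 + d0), Char.ofNat (48 + d1), Char.ofNat (48 + d2), Char.ofNat (48 + d3), Char.ofNat (48 + d4), Char.ofNat (48 + d5), Char.ofNat (48 + d6), Char.ofNat (48 + d7), Char.ofNat (48 + d8), Char.ofNat (48 + d9), Char.ofNat (48 + d10), Char.ofNat (48 + d11), Char.ofNat (48 + d12)] (some 2) (some 4) = [Char.ofNat (48 + d2), Char.ofNat (48 + d3)] := by
      rw [PySem.List.slice_toNat _ (by norm_num) (by norm_num)]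
      rfl
    have hs4 : PySem.List.slice [Char.ofNat (48 + d0), Char.ofNat (48 + d1), Char.ofNat (48 + d2), Char.ofNat (48 + d3), Char.ofNat (48 + d4), Char.ofNat (48 + d5), Char.ofNat (48 + d6), Char.ofNat (48 + d7), Char.ofNat (48 + d8), Char.ofNat (48 + d9), Char.ofNat (48 + d10), Char.ofNat (48 + d11), Char.ofNat (48 + d12)] (some 4) (some 6) = [Char.ofNat (48 + d4), Char.ofNat (48 + d5)] := by
      rw [PySem.List.slice_toNat _ (by norm_num) (by norm_num)]
      rfl
    have hdl : PySem.List.slice [Char.ofNat (48 + d0), Char.ofNat (48 + d1), Char.ofNat (48 + d2), Char.ofNat (48 + d3), Char.ofNat (48 + d4), Char.ofNat (48 + d5), Char.ofNat (48 + d6), Char.ofNat (48 + d7), Char.ofNat (48 + d8), Char.ofNat (48 + d9), Char.ofNat (48 + d10), Char.ofNat (48 + d11), Char.ofNat (48 + d12)] none (some (-1)) = [Char.ofNat (48 + d0), Char.ofNat (48 + d1), Char.ofNat (48 + d2), Char.ofNat (48 + d3), Char.ofNat (48 + d4), Char.ofNat (48 + d5), Char.ofNat (48 + d6), Char.ofNat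 (48 + d7), Char.ofNat (48 + d8), Char.ofNat (48 + d9), Char.ofNat (48 + d10), Char.ofNat (48 + d11)] := by
      rw [PySem.List.slice_to_neg_one]
      rfl
    have hen : PySem.List.enumerate [Char.ofNat (48 + d0), Char.ofNat (48 + d1), Char.ofNat (48 + d2), Char.ofNat (48 + d3), Char.ofNat (48 + d4), Char.ofNat (48 + d5), Char.ofNat (48 + d6), Char.ofNat (48 + d7), Char.ofNat (48 + d8), Char.ofNat (48 + d9), Char.ofNat (48 + d10), Char.ofNat (48 + d11)] = [((0 : Int), Char.ofNat (48 + d0)), ((1 : Int), Char.ofNat (48 + d1)), ((2 : Int), Char.ofNat (48 + d2)), ((3 : Int), Char.ofNat (48 + d3)), ((4 : Int), Char.ofNat (48 + d4)), ((5 : Int), Char.ofNat (48 + d5)), ((6 : Int), Char.ofNat (48 + d6)), ((7 : Int), Char.ofNat (48 + d7)), ((8 : Int), Char.ofNat (48 + d8)), ((9 : Int), Char.ofNat (48 + d9)), ((10 : Int), Char.ofNat (48 + d10)), ((11 : Int), Char.ofNat (48 + d11))] := rfl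
    have hlast : PySem.List.pyGetD [Char.ofNat (48 + d0), Char.ofNat (48 + d1), Char.ofNat (48 + d2), Char.ofNat (48 + d3), Char.ofNat (48 + d4), Char.ofNat (48 + d5), Char.ofNat (48 + d6), Char.ofNat (48 + d7), Char.ofNat (48 + d8), Char.ofNat (48 + d9), Char.ofNat (48 + d10), Char.ofNat (48 + d11), Char.ofNat (48 + d12)] (-1) ' ' = Char.ofNat (48 + d12) := by
      rw [PySem.List.pyGetD_neg_one _ _ (List.cons_ne_nil _ _)]
      rfl
    have hb0 : PySem.List.pyGetD [Char.ofNat (48 + d0), Char.ofNat (48 + d1), Char.ofNat (48 + d2), Char.ofNat (48 + d3), Char.ofNat (48 + d4), Char.ofNat (48 + d5), Char.ofNat (48 + d6), Char.ofNat (48 + d7), Char.ofNat (48 + d8), Char.ofNat (48 + d9), Char.ofNat (48 + d10), Char.ofNat (48 + d11), Char.ofNat (48 + d12)] (0 : Int) ' ' = Char.ofNat (48 + d0) := rfl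
    have hb1 : PySem.List.pyGetD [Char.ofNat (48 + d0), Char.ofNat (48 + d1), Char.ofNat (48 + d2), Char.ofNat (48 + d3), Char.ofNat (48 + d4), Char.ofNat (48 + d5), Char.ofNat (48 + d6), Char.ofNat (48 + d7), Char.ofNat (48 + d8), Char.ofNat (48 + d9), Char.ofNat (48 + d10), Char.ofNat (48 + d11), Char.ofNat (48 + d12)] (1 : Int) ' ' = Char.ofNat (48 + d1) := rfl
    have hb2 : PySem.List.pyGetD [Char.ofNat (48 + d0), Char.ofNat (48 + d1), Char.ofNat (48 + d2), Char.ofNat (48 + d3), Char.ofNat (48 + d4), Char.ofNat (48 + d5), Char.ofNat (48 + d6), Char.ofNat (48 + d7), Char.ofNat (48 + d8), Char.ofNat (48 + d9), Char.ofNat (48 + d10), Char.ofNat (48 + d11), Char.ofNat (48 + d12)] (2 : Int) ' ' = Char.ofNat (48 + d2) := rfl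
    have hb3 : PySem.List.pyGetD [Char.ofNat (48 + d0), Char.ofNat (48 + d1), Char.ofNat (48 + d2), Char.ofNat (48 + d3), Char.ofNat (48 + d4), Char.ofNat (48 + d5), Char.ofNat (48 + d6), Char.ofNat (48 + d7), Char.ofNat (48 + d8), Char.ofNat (48 + d9), Char.ofNat (48 + d10), Char.ofNat (48 + d11), Char.ofNat (48 + d12)] (3 : Int) ' ' = Char.ofNat (48 + d3) := rfl
    have hb4 : PySem.List.pyGetD [Char.ofNat (48 + d0), Char.ofNat (48 + d1), Char.ofNat (48 + d2), Char.ofNat (48 + d3), Char.ofNat (48 + d4), Char.ofNat (48 + d5), Char.ofNat (48 + d6), Char.ofNat (48 + d7), Char.ofNat (48 + d8), Char.ofNat (48 + d9), Char.ofNat (48 + d10), Char.ofNat (48 + d11), Char.ofNat (48 + d12)] (4 : Int) ' ' = Char.ofNat (48 + d4) := rfl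
    have hb5 : PySem.List.pyGetD [Char.ofNat (48 + d0), Char.ofNat (48 + d1), Char.ofNat (48 + d2), Char.ofNat (48 + d3), Char.ofNat (48 + d4), Char.ofNat (48 + d5), Char.ofNat (48 + d6), Char.ofNat (48 + d7), Char.ofNat (48 + d8), Char.ofNat (48 + d9), Char.ofNat (48 + d10), Char.ofNat (48 + d11), Char.ofNat (48 + d12)] (5 : Int) ' ' = Char.ofNat (48 + d5) := rfl
    have hb6 : PySem.List.pyGetD [Char.ofNat (48 + d0), Char.ofNat (48 + d1), Char.ofNat (48 + d2), Char.ofNat (48 + d3), Char.ofNat (48 + d4), Char.ofNat (48 + d5), Char.ofNat (48 + d6), Char.ofNat (48 + d7), Char.ofNat (48 + d8), Char.ofNat (48 + d9), Char.ofNat (48 + d10), Char.ofNat (48 + d11), Char.ofNat (48 + d12)] (6 : Int) ' ' = Char.ofNat (48 + d6) := rfl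
    have hb7 : PySem.List.pyGetD [Char.ofNat (48 + d0), Char.ofNat (48 + d1), Char.ofNat (48 + d2), Char.ofNat (48 + d3), Char.ofNat (48 + d4), Char.ofNat (48 + d5), Char.ofNat (48 + d6), Char.ofNat (48 + d7), Char.ofNat (48 + d8), Char.ofNat (48 + d9), Char.ofNat (48 + d10), Char.ofNat (48 + d11), Char.ofNat (48 + d12)] (7 : Int) ' ' = Char.ofNat (48 + d7) := rfl
    have hb8 : PySem.List.pyGetD [Char.ofNat (48 + d0), Char.ofNat (48 + d1), Char.ofNat (48 + d2), Char.ofNat (48 + d3), Char.ofNat (48 + d4), Char.ofNat (48 + d5), Char.ofNat (48 + d6), Char.ofNat (48 + d7), Char.ofNat (48 + d8), Char.ofNat (48 + d9), Char.ofNat (48 + d10), Char.ofNat (48 + d11), Char.ofNat (48 + d12)] (8 : Int) ' ' = Char.ofNat (48 + d8) := rfl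
    have hb9 : PySem.List.pyGetD [Char.ofNat (48 + d0), Char.ofNat (48 + d1), Char.ofNat (48 + d2), Char.ofNat (48 + d3), Char.ofNat (48 + d4), Char.ofNat (48 + d5), Char.ofNat (48 + d6), Char.ofNat (48 + d7), Char.ofNat (48 + d8), Char.ofNat (48 + d9), Char.ofNat (48 + d10), Char.ofNat (48 + d11), Char.ofNat (48 + d12)] (9 : Int) ' ' = Char.ofNat (48 + d9) := rfl
    have hb10 : PySem.List.pyGetD [Char.ofNat (48 + d0), Char.ofNat (48 + d1), Char.ofNat (48 + d2), Char.ofNat (48 + d3), Char.ofNat (48 + d4), Char.ofNat (48 + d5), Char.ofNat (48 + d6), Char.ofNat (48 + d7), Char.ofNat (48 + d8), Char.ofNat (48 + d9), Char.ofNat (48 + d10), Char.ofNat (48 + d11), Char.ofNat (48 + d12)] (10 : Int) ' ' = Char.ofNat (48 + d10) := rfl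
    have hb11 : PySem.List.pyGetD [Char.ofNat (48 + d0), Char.ofNat (48 + d1), Char.ofNat (48 + d2), Char.ofNat (48 + d3), Char.ofNat (48 + d4), Char.ofNat (48 + d5), Char.ofNat (48 + d6), Char.ofNat (48 + d7), Char.ofNat (48 + d8), Char.ofNat (48 + d9), Char.ofNat (48 + d10), Char.ofNat (48 + d11), Char.ofNat (48 + d12)] (11 : Int) ' ' = Char.ofNat (48 + d11) := rfl
    have hb12 : PySem.List.pyGetD [Char.ofNat (48 + d0), Char.ofNat (48 + d1), Char.ofNat (48 + d2), Char.ofNat (48 + d3), Char.ofNat (48 + d4), Char.ofNat (48 + d5), Char.ofNat (48 + d6), Char.ofNat (48 + d7), Char.ofNat (48 + d8), Char.ofNat (48 + d9), Char.ofNat (48 + d10), Char.ofNat (48 + d11), Char.ofNat (48 + d12)] (12 : Int) ' ' = Char.ofNat (48 + d12) := rfl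
    have hm0 : (PySem.Int.mod (0 : Int) 2 == 0) = true := by decide
    have hm1 : (PySem.Int.mod (1 : Int) 2 == 0) = false := by decide
    have hm2 : (PySem.Int.mod (2 : Int) 2 == 0) = true := by decide
    have hm3 : (PySem.Int.mod (3 : Int) 2 == 0) = false := by decide
    have hm4 : (PySem.Int.mod (4 : Int) 2 == 0) = true := by decide
    have hm5 : (PySem.Int.mod (5 : Int) 2 == 0) = false := by decide
    have hm6 : (PySem.Int.mod (6 : Int) 2 == 0) = true := by decide
    have hm7 : (PySem.Int.mod (7 : Int) 2 == 0) = false := by decide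
    have hm8 : (PySem.Int.mod (8 : Int) 2 == 0) = true := by decide
    have hm9 : (PySem.Int.mod (9 : Int) 2 == 0) = false := by decide
    have hm10 : (PySem.Int.mod (10 : Int) 2 == 0) = true := by decide
    have hm11 : (PySem.Int.mod (11 : Int) 2 == 0) = false := by decide
    rw [hs0, hs2, hs4, pvOfCharsTwo d0 d1 hd0 hd1, pvOfCharsTwo d2 d3 hd2 hd3,
      pvOfCharsTwo d4 d5 hd4 hd5]
    dsimp only
    split_ifs with hmd
    · rfl
    · rw [hdl, hen, hR0, hR1]
      simp only [List.foldl_cons, List.foldl_nil, hb0, hb1, hb2, hb3, hb4, hb5, hb6, hb7, hb8,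
        hb9, hb10, hb11, hb12, hlast, hm0, hm1, hm2, hm3, hm4, hm5, hm6, hm7, hm8, hm9, hm10,
        hm11, pvOfCharsOne d0 hd0, pvOfCharsOne d1 hd1, pvOfCharsOne d2 hd2, pvOfCharsOne d3 hd3, pvOfCharsOne d4 hd4, pvOfCharsOne d5 hd5, pvOfCharsOne d6 hd6, pvOfCharsOne d7 hd7, pvOfCharsOne d8 hd8, pvOfCharsOne d9 hd9, pvOfCharsOne d10 hd10, pvOfCharsOne d11 hd11, pvOfCharsOne d12 hd12, Option.getD_some, reduceIte]
      rw [pvLuhn6 d1 d3 d5 d7 d9 d11 hd1 hd3 hd5 hd7 hd9 hd11]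
      simp only [pvAdjCast]
      have hS : ∀ x y : Int, x = y →
          decide (PySem.Int.mod (10 - PySem.Int.mod x 10) 10 = ((d12 : Nat) : Int)) =
          decide (PySem.Int.mod (10 - PySem.Int.mod y 10) 10 = ((d12 : Nat) : Int)) :=
        fun x y h => by rw [h]
      apply hS
      push_cast
      ring
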